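-- pv_equiv track=rewrite | github.com/DanDreadless/Insight | backend/scanner/modules/robots_checker.py | _extract_relevant_rules
-- ===== SOURCE A (Python) =====
-- def _extract_relevant_rules(robots_text: str, ua: str) -> str:
--     """
--     Return the User-agent blocks from robots_text that apply to ``ua`` or ``*``,
--     formatted as a string for display in the finding evidence block.
--     """
--     ua_lower = ua.lower()
--
--     # Split the file into logical blocks (separated by blank lines / comments)
--     blocks: list[list[str]] = []
--     current: list[str] = []
--     for line in robots_text.splitlines():
--         stripped = line.strip()
--         if stripped and not stripped.startswith('#'):
--             current.append(stripped)
--         else: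
--             if current:
--                 blocks.append(current)
--                 current = []
--     if current:
--         blocks.append(current)
--
--     matched: list[str] = []
--     for block in blocks:
--         agents = [
--             l.split(':', 1)[1].strip().lower()
--             for l in block
--             if l.lower().startswith('user-agent:')
--         ]
--         if any(a in (ua_lower, '*') for a in agents):
--             matched.extend(block)
--             matched.append('')  # blank line between blocks
--
--     return '\n'.join(matched).strip() or '(rules not extracted)'
-- ===== SOURCE B (Python) =====
-- def _extract_relevant_rules(robots_text: str, ua: str) -> str:
--     """Single pass: no intermediate blocks list; flush each block as its end is seen."""
--     targets = (ua.lower(), '*')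
--     out: list[str] = []
--     current: list[str] = []
--     hit = False
--     for line in robots_text.splitlines():
--         s = line.strip()
--         if s and not s.startswith('#'):
--             current.append(s)
--             if s.lower().startswith('user-agent:') and s.split(':', 1)[1].strip().lower() in targets:
--                 hit = True
--         elif current:
--             if hit:
--                 out.extend(current)
--                 out.append('')
--             current = []
--             hit = False
--     if current and hit:
--         out.extend(current)
--         out.append('')
--     return '\n'.join(out).strip() or '(rules not extracted)'
-- ===== Notes on version B (the rewrite author's own statement) =====
-- stated objective: alternative
-- what changed: The two sequential passes (build a list of blocks, then re-scan every block's lines for matching user-agent headers) are fused into one pass that tracks the current block and a matched flag and flushes each block at its boundary, so the intermediate blocks list and the per-block agents re-scan disappear.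
import Mathlib
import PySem

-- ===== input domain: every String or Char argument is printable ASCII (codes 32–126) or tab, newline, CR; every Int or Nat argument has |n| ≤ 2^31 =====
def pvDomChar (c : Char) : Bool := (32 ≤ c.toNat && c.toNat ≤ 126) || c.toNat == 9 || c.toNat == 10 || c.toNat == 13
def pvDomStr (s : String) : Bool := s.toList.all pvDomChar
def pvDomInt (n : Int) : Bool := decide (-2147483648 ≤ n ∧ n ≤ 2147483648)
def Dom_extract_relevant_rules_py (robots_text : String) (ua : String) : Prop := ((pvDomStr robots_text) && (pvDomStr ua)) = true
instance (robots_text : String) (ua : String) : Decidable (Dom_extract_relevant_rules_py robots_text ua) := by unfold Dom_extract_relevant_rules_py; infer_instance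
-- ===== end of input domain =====

-- B fuses A's two passes into one: a single scan over the lines flushes each matched
-- block as its boundary is seen, eliminating the intermediate `blocks` list (objective: alternative).


-- shared subexpressions (identical in both Pythons):
-- `stripped and not stripped.startswith('#')`
def pvContent (s : String) : Bool := s != "" && !PySem.Str.startswith s "#"
-- `l.lower().startswith('user-agent:')`
def pvIsUA (l : String) : Bool := PySem.Str.startswith (PySem.Str.lower l) "user-agent:"
-- `l.split(':', 1)[1].strip().lower()`; the getD default is unreachable: it is only
-- evaluated under pvIsUA, so l contains ':' and split(':',1) has two pieces.
def pvAgentOf (l : String) : String :=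
  PySem.Str.lower (PySem.Str.strip (((PySem.Str.splitMax? l ":" 1).getD []).getD 1 ""))

-- ===== PORT A =====
def extract_relevant_rules_py (robots_text : String) (ua : String) : String :=
  let ua_lower := PySem.Str.lower ua
  -- first loop: split into blocks
  let st := (PySem.Str.splitlines robots_text).foldl
    (fun (st : List (List String) × List String) line =>
      let stripped := PySem.Str.strip line
      if pvContent stripped then (st.1, st.2 ++ [stripped])
      else if st.2 ≠ [] then (st.1 ++ [st.2], []) else st)
    ([], [])
  let blocks := if st.2 ≠ [] then st.1 ++ [st.2] else st.1
  -- second loop: collect matched blocks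
  let matched := blocks.foldl
    (fun (m : List String) block =>
      let agents := (block.filter pvIsUA).map pvAgentOf
      if agents.any (fun a => a == ua_lower || a == "*") then m ++ block ++ [""] else m)
    []
  let joined := PySem.Str.strip (PySem.Str.join "\n" matched)
  if joined ≠ "" then joined else "(rules not extracted)"

-- ===== PORT B =====
-- `s.lower().startswith('user-agent:') and s.split(':',1)[1].strip().lower() in targets`
def pvMatchLine (t1 : String) (s : String) : Bool :=
  pvIsUA s && (pvAgentOf s == t1 || pvAgentOf s == "*")

def extract_relevant_rules_py_alt (robots_text : String) (ua : String) : String :=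
  let t1 := PySem.Str.lower ua
  -- single pass: state = (out, current, hit)
  let st := (PySem.Str.splitlines robots_text).foldl
    (fun (st : List String × List String × Bool) line =>
      let s := PySem.Str.strip line
      if pvContent s then (st.1, st.2.1 ++ [s], st.2.2 || pvMatchLine t1 s)
      else if st.2.1 ≠ [] then
        (if st.2.2 then st.1 ++ st.2.1 ++ [""] else st.1, [], false)
      else st)
    ([], [], false)
  let out := if st.2.1 ≠ [] ∧ st.2.2 = true then st.1 ++ st.2.1 ++ [""] else st.1
  let joined := PySem.Str.strip (PySem.Str.join "\n" out)
  if joined ≠ "" then joined else "(rules not extracted)"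

-- ===== PRECONDITION & SPEC =====
def Spec_extract_relevant_rules_py (robots_text : String) (ua : String) (out : String) : Prop := out = extract_relevant_rules_py_alt robots_text ua
instance (robots_text : String) (ua : String) (out : String) : Decidable (Spec_extract_relevant_rules_py robots_text ua out) := by unfold Spec_extract_relevant_rules_py; infer_instance

-- ===== CLAIM (what is proved, stated in full; the proofs are below) =====
def Claim_equal_extract_relevant_rules_py : Prop := ∀ (robots_text : String) (ua : String), Dom_extract_relevant_rules_py robots_text ua → Spec_extract_relevant_rules_py robots_text ua (extract_relevant_rules_py robots_text ua)

-- ===== LEMMAS AND PROOFS =====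

-- A's per-block test equals "some line matches"
theorem pvAgents_any (t1 : String) (block : List String) :
    ((block.filter pvIsUA).map pvAgentOf).any (fun a => a == t1 || a == "*")
      = block.any (pvMatchLine t1) := by
  rw [List.any_map, List.any_filter]
  simp only [Function.comp]
  rfl

-- what a matched block contributes to A's output list
def pvG (t1 : String) (block : List String) : List String :=
  if block.any (pvMatchLine t1) then block ++ [""] else []

theorem pvLoop (t1 : String) (lines : List String)
    (blocks : List (List String)) (out cur : List String) (hit : Bool)
    (hout : out = blocks.flatMap (pvG t1)) (hhit : hit = cur.any (pvMatchLine t1)) :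
    (lines.foldl
      (fun (st : List String × List String × Bool) line =>
        let s := PySem.Str.strip line
        if pvContent s then (st.1, st.2.1 ++ [s], st.2.2 || pvMatchLine t1 s)
        else if st.2.1 ≠ [] then
          (if st.2.2 then st.1 ++ st.2.1 ++ [""] else st.1, [], false)
        else st)
      (out, cur, hit))
    = (let a := lines.foldl
        (fun (st : List (List String) × List String) line =>
          let stripped := PySem.Str.strip line
          if pvContent stripped then (st.1, st.2 ++ [stripped])
          else if st.2 ≠ [] then (st.1 ++ [st.2], []) else st)
        (blocks, cur)
       (a.1.flatMap (pvG t1), a.2, a.2.any (pvMatchLine t1))) := by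
  induction lines generalizing blocks out cur hit with
  | nil => simp [hout, hhit]
  | cons line rest ih =>
    simp only [List.foldl_cons]
    by_cases hc : pvContent (PySem.Str.strip line)
    · simp only [hc, if_pos]
      exact ih _ _ _ _ hout (by simp [hhit, List.any_append])
    · simp only [hc, if_neg, Bool.false_eq_true, not_false_eq_true]
      by_cases hcur : cur = []
      · subst hcur
        simp only [ne_eq, not_true_eq_false, if_false]
        exact ih _ _ _ _ hout (by simp [hhit])
      · simp only [ne_eq, hcur, not_false_eq_true, if_pos]
        refine ih _ _ _ _ ?_ (by simp)
        simp [hout, pvG, ← hhit, List.append_assoc]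
        by_cases h2 : hit <;> simp [h2]

theorem pvFoldFlat (t1 : String) (bl : List (List String)) :
    bl.foldl (fun (m : List String) block =>
        if block.any (pvMatchLine t1) then m ++ block ++ [""] else m) []
      = bl.flatMap (pvG t1) := by
  have h := PySem.List.foldl_append_eq_flatMap (g := pvG t1) (l := bl) (acc := ([] : List String))
  simp only [List.nil_append] at h
  rw [← h]
  apply PySem.List.foldl_congr_mem
  intro acc x _
  by_cases hx : x.any (pvMatchLine t1) <;> simp [pvG, hx, List.append_assoc]

theorem pvFinal (t1 : String) (bl : List (List String)) (cur : List String) :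
    (if cur ≠ [] then bl ++ [cur] else bl).foldl
      (fun (m : List String) block =>
        if block.any (pvMatchLine t1) then m ++ block ++ [""] else m) []
    = (if cur ≠ [] ∧ (cur.any (pvMatchLine t1)) = true
        then bl.flatMap (pvG t1) ++ cur ++ [""] else bl.flatMap (pvG t1)) := by
  by_cases h : cur = []
  · simp only [h, ne_eq, not_true_eq_false, false_and, if_false]
    exact pvFoldFlat t1 bl
  · simp only [ne_eq, h, not_false_eq_true, if_pos, true_and]
    rw [List.foldl_append, pvFoldFlat]
    simp only [List.foldl_cons, List.foldl_nil]

theorem extract_relevant_rules_eq (robots_text ua : String) :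
    extract_relevant_rules_py robots_text ua = extract_relevant_rules_py_alt robots_text ua := by
  unfold extract_relevant_rules_py extract_relevant_rules_py_alt
  simp only [pvAgents_any]
  rw [pvLoop (PySem.Str.lower ua) (PySem.Str.splitlines robots_text) [] [] [] false rfl rfl]
  rw [pvFinal]

-- ===== VERDICT (by name: the statement is the Claim_ definition above) =====
theorem extract_relevant_rules_py_spec : Claim_equal_extract_relevant_rules_py := by
  intro robots_text ua _
  unfold Spec_extract_relevant_rules_py
  exact extract_relevant_rules_eq robots_text ua
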